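-- pv_equiv track=rewrite | github.com/kristofrm/Small-Projects | music_dictionary.py | who_sang
-- ===== SOURCE A (Python) =====
-- def who_sang(dictionary, title):
--     title = title.lower()
--     #Compare stored songs to inputted title for each album for each artist
--     for artist in dictionary:
--         for album in dictionary[artist]:
--             for index in range(len(dictionary[artist][album])):
--                 song = dictionary[artist][album][index]
--                 song = song.lower()
--                 #If inputted title is found, return artist of that title
--                 if song == title:
--                     return artist
--     #If no artist, return empty string
--     return ''
-- ===== SOURCE B (Python) =====
-- def who_sang(dictionary, title):
--     # Build an index: lowercased song title -> artist, first occurrence wins,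
--     # then answer the query with a single dict lookup.
--     index = {}
--     for artist in dictionary:
--         for album in dictionary[artist]:
--             for song in dictionary[artist][album]:
--                 key = song.lower()
--                 if key not in index:
--                     index[key] = artist
--     return index.get(title.lower(), '')
-- ===== Notes on version B (the rewrite author's own statement) =====
-- stated objective: alternative
-- what changed: Replaces A's scan-until-first-match over the nested dict with a build-an-index pass (lowercased song -> artist, first occurrence wins) followed by a single dict lookup.
import Mathlib
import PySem

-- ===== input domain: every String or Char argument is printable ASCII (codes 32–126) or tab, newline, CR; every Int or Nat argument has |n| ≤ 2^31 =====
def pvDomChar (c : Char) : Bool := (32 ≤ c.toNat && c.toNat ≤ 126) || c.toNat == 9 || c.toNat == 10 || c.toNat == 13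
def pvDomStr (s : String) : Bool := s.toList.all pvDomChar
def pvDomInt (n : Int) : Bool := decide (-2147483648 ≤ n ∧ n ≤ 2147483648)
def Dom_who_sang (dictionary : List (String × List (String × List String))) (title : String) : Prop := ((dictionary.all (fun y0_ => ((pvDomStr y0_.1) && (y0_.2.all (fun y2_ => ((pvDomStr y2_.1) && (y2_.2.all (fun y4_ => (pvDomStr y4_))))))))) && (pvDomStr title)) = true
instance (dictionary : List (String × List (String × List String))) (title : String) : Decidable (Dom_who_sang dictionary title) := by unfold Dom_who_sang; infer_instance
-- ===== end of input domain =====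

-- B replaces A's scan-until-first-match with a build-an-index pass (lowercased song -> artist,
-- first occurrence wins) followed by one dict lookup; same cost, different decomposition.

-- ===== PORT A =====
-- inner 'for index in range(len(songs))' loop: return artist on the first matching song
def pvSongsA (artist t : String) : List String → Option String
  | [] => none
  | s :: rest => if PySem.Str.lower s = t then some artist else pvSongsA artist t rest

-- 'for album in dictionary[artist]' loop
def pvAlbumsA (artist t : String) : List (String × List String) → Option String
  | [] => none
  | (_, songs) :: rest =>
    match pvSongsA artist t songs with
    | some a => some a
    | none => pvAlbumsA artist t rest

-- 'for artist in dictionary' loop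
def pvArtistsA (t : String) : List (String × List (String × List String)) → Option String
  | [] => none
  | (artist, albums) :: rest =>
    match pvAlbumsA artist t albums with
    | some a => some a
    | none => pvArtistsA t rest

def who_sang (dictionary : List (String × List (String × List String))) (title : String) : String :=
  (pvArtistsA (PySem.Str.lower title) dictionary).getD ""

-- ===== PORT B =====
-- one pass building index : lowercased song -> artist, inserting only if the key is absent
def pvIndexB (dictionary : List (String × List (String × List String))) : PySem.Dict String String :=
  dictionary.foldl (fun d p =>
    p.2.foldl (fun d q =>
      q.2.foldl (fun d song =>
        let key := PySem.Str.lower song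
        if d.contains key then d else d.insert key p.1) d) d) PySem.Dict.empty

def who_sang_alt (dictionary : List (String × List (String × List String))) (title : String) : String :=
  ((pvIndexB dictionary).get? (PySem.Str.lower title)).getD ""

-- ===== PRECONDITION & SPEC =====
def Spec_who_sang (dictionary : List (String × List (String × List String))) (title : String) (out : String) : Prop := out = who_sang_alt dictionary title
instance (dictionary : List (String × List (String × List String))) (title : String) (out : String) : Decidable (Spec_who_sang dictionary title out) := by unfold Spec_who_sang; infer_instance

-- ===== CLAIM (what is proved, stated in full; the proofs are below) =====
def Claim_equal_who_sang : Prop := ∀ (dictionary : List (String × List (String × List String))) (title : String), Dom_who_sang dictionary title → Spec_who_sang dictionary title (who_sang dictionary title)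

-- ===== LEMMAS AND PROOFS =====

-- one insert-if-absent step over songs, read back at key t
theorem pv_get_songs (artist t : String) (songs : List String) (d : PySem.Dict String String) :
    (songs.foldl (fun d song =>
        let key := PySem.Str.lower song
        if d.contains key then d else d.insert key artist) d).get? t
      = (d.get? t).or (pvSongsA artist t songs) := by
  induction songs generalizing d with
  | nil => simp [pvSongsA]
  | cons s rest ih =>
    simp only [List.foldl_cons, pvSongsA, ih]
    by_cases hk : PySem.Str.lower s = t
    · subst hk
      by_cases hc : d.contains (PySem.Str.lower s) = true
      · have := PySem.Dict.contains_eq_isSome_get? d (PySem.Str.lower s)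
        rw [hc] at this
        cases h : d.get? (PySem.Str.lower s) with
        | none => rw [h] at this; simp at this
        | some a => simp [hc, h]
      · simp only [Bool.not_eq_true] at hc
        have hn : d.get? (PySem.Str.lower s) = none := by
          cases h : d.get? (PySem.Str.lower s) with
          | none => rfl
          | some a =>
            have := PySem.Dict.contains_eq_isSome_get? d (PySem.Str.lower s)
            rw [h, hc] at this; simp at this
        simp [hc, hn, PySem.Dict.get?_insert_self]
    · by_cases hc : d.contains (PySem.Str.lower s) = true
      · simp [hc, if_neg hk]
      · simp only [Bool.not_eq_true] at hc
        rw [if_neg hk, hc, if_neg (Bool.false_ne_true),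
          PySem.Dict.get?_insert_of_ne d artist
            (show t ≠ PySem.Str.lower s from fun h => hk (Eq.symm h))]

theorem pv_get_albums (artist t : String) (albums : List (String × List String)) (d : PySem.Dict String String) :
    (albums.foldl (fun d q =>
        q.2.foldl (fun d song =>
          let key := PySem.Str.lower song
          if d.contains key then d else d.insert key artist) d) d).get? t
      = (d.get? t).or (pvAlbumsA artist t albums) := by
  induction albums generalizing d with
  | nil => simp [pvAlbumsA]
  | cons a rest ih =>
    obtain ⟨name, songs⟩ := a
    simp only [List.foldl_cons, pvAlbumsA, ih, pv_get_songs]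
    cases pvSongsA artist t songs <;> cases d.get? t <;> simp

theorem pv_get_artists (t : String) (dict : List (String × List (String × List String))) (d : PySem.Dict String String) :
    (dict.foldl (fun d p =>
        p.2.foldl (fun d q =>
          q.2.foldl (fun d song =>
            let key := PySem.Str.lower song
            if d.contains key then d else d.insert key p.1) d) d) d).get? t
      = (d.get? t).or (pvArtistsA t dict) := by
  induction dict generalizing d with
  | nil => simp [pvArtistsA]
  | cons a rest ih =>
    obtain ⟨artist, albums⟩ := a
    simp only [List.foldl_cons, pvArtistsA, ih, pv_get_albums]
    cases pvAlbumsA artist t albums <;> cases d.get? t <;> simp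

-- ===== VERDICT (by name: the statement is the Claim_ definition above) =====
theorem who_sang_spec : Claim_equal_who_sang := by
  intro dictionary title _
  unfold Spec_who_sang who_sang who_sang_alt pvIndexB
  rw [pv_get_artists]
  simp
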